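-- pv_equiv track=rewrite | github.com/caomicc/polisheddex | process_sprites.py | get_type_based_palette
-- ===== SOURCE A (Python) =====
-- from typing import Dict, List, Tuple, Optional
--
-- def get_type_based_palette(mini_name: str) -> List[Tuple[int, int, int]]:
--     """Get a palette based on Pokemon type characteristics for overworld sprites"""
--     mini_lower = mini_name.lower()
--
--     # Common Pokemon type color schemes for overworld sprites
--     if any(word in mini_lower for word in ['pikachu', 'raichu', 'electabuzz', 'elekid', 'magnezone', 'electrode', 'zapdos']):
--         return [(255, 255, 200), (255, 220, 0), (200, 150, 0), (100, 80, 0)]  # Electric - Yellow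
--     elif any(word in mini_lower for word in ['charizard', 'charmander', 'charmeleon', 'arcanine', 'growlithe', 'moltres']):
--         return [(255, 240, 200), (255, 100, 50), (200, 60, 30), (120, 40, 20)]  # Fire - Red/Orange
--     elif any(word in mini_lower for word in ['blastoise', 'squirtle', 'wartortle', 'gyarados', 'lapras', 'articuno']):
--         return [(240, 240, 255), (100, 150, 255), (60, 100, 200), (30, 60, 150)]  # Water - Blue
--     elif any(word in mini_lower for word in ['venusaur', 'bulbasaur', 'ivysaur', 'oddish', 'bellsprout']):
--         return [(240, 255, 240), (100, 200, 100), (60, 150, 60), (30, 100, 30)]  # Grass - Green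
--     elif any(word in mini_lower for word in ['gengar', 'gastly', 'haunter', 'misdreavus', 'murkrow']):
--         return [(200, 180, 220), (120, 80, 160), (80, 50, 120), (50, 30, 80)]  # Ghost - Purple
--     elif any(word in mini_lower for word in ['machamp', 'machoke', 'machop', 'hitmon']):
--         return [(255, 220, 180), (200, 140, 100), (150, 100, 70), (100, 70, 50)]  # Fighting - Brown
--     elif any(word in mini_lower for word in ['alakazam', 'abra', 'kadabra', 'mewtwo', 'mew']):
--         return [(255, 240, 255), (200, 150, 200), (150, 100, 150), (100, 60, 100)]  # Psychic - Pink
--     else: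
--         # Default neutral palette for unknown types
--         return [(240, 240, 240), (180, 180, 180), (120, 120, 120), (80, 80, 80)]  # Normal - Gray
-- ===== SOURCE B (Python) =====
-- # B: instead of testing every keyword against the name, enumerate the name's
-- # substrings (lengths 3..10, the keyword lengths) and look each up in a hash
-- # map keyword -> rule rank; the smallest rank found picks the palette.
-- PALETTES = [
--     [(255, 255, 200), (255, 220, 0), (200, 150, 0), (100, 80, 0)],       # 0 Electric
--     [(255, 240, 200), (255, 100, 50), (200, 60, 30), (120, 40, 20)],     # 1 Fire
--     [(240, 240, 255), (100, 150, 255), (60, 100, 200), (30, 60, 150)],   # 2 Water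
--     [(240, 255, 240), (100, 200, 100), (60, 150, 60), (30, 100, 30)],    # 3 Grass
--     [(200, 180, 220), (120, 80, 160), (80, 50, 120), (50, 30, 80)],      # 4 Ghost
--     [(255, 220, 180), (200, 140, 100), (150, 100, 70), (100, 70, 50)],   # 5 Fighting
--     [(255, 240, 255), (200, 150, 200), (150, 100, 150), (100, 60, 100)], # 6 Psychic
--     [(240, 240, 240), (180, 180, 180), (120, 120, 120), (80, 80, 80)],   # 7 Normal (default)
-- ]
--
-- KW_RANK = {
--     'pikachu': 0, 'raichu': 0, 'electabuzz': 0, 'elekid': 0, 'magnezone': 0, 'electrode': 0, 'zapdos': 0,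
--     'charizard': 1, 'charmander': 1, 'charmeleon': 1, 'arcanine': 1, 'growlithe': 1, 'moltres': 1,
--     'blastoise': 2, 'squirtle': 2, 'wartortle': 2, 'gyarados': 2, 'lapras': 2, 'articuno': 2,
--     'venusaur': 3, 'bulbasaur': 3, 'ivysaur': 3, 'oddish': 3, 'bellsprout': 3,
--     'gengar': 4, 'gastly': 4, 'haunter': 4, 'misdreavus': 4, 'murkrow': 4,
--     'machamp': 5, 'machoke': 5, 'machop': 5, 'hitmon': 5,
--     'alakazam': 6, 'abra': 6, 'kadabra': 6, 'mewtwo': 6, 'mew': 6,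
-- }
--
-- def get_type_based_palette(mini_name):
--     """Get a palette based on Pokemon type characteristics for overworld sprites"""
--     s = mini_name.lower()
--     n = len(s)
--     best = len(PALETTES) - 1  # 7 = default gray palette
--     for i in range(n):
--         for j in range(i + 3, min(i + 10, n) + 1):
--             r = KW_RANK.get(s[i:j])
--             if r is not None and r < best:
--                 best = r
--     return PALETTES[best]
-- ===== Notes on version B (the rewrite author's own statement) =====
-- stated objective: alternative
-- what changed: Inverts the search: instead of an if/elif ladder testing each keyword for substring containment, B enumerates the lowered name's substrings of keyword lengths (3..10), looks each up in a keyword->rank hash map, and returns the palette of the smallest rank found (default gray if none).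
import Mathlib
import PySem

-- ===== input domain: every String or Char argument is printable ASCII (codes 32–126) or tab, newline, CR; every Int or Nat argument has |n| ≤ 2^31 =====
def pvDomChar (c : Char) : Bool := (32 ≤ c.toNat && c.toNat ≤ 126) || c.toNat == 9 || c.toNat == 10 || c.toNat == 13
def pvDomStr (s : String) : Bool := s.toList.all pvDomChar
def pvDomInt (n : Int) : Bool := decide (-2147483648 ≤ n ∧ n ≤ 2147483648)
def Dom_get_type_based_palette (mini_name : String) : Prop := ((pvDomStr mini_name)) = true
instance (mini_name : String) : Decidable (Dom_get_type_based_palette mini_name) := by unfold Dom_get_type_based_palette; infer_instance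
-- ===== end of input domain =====

-- B inverts the search: instead of A's if/elif ladder of per-keyword substring tests, it enumerates the
-- lowered name's substrings of keyword lengths (3..10), looks each up in a keyword->rank hash map, and
-- returns the palette of the smallest rank found (alternative algorithm; same behaviour).

-- ===== PORT A =====
def get_type_based_palette (mini_name : String) : List (Int × Int × Int) :=
  let mini_lower := PySem.Str.lower mini_name
  if (["pikachu", "raichu", "electabuzz", "elekid", "magnezone", "electrode", "zapdos"].any
      (fun w => PySem.Str.isIn w mini_lower)) then
    [(255, 255, 200), (255, 220, 0), (200, 150, 0), (100, 80, 0)]  -- Electric - Yellow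
  else if (["charizard", "charmander", "charmeleon", "arcanine", "growlithe", "moltres"].any
      (fun w => PySem.Str.isIn w mini_lower)) then
    [(255, 240, 200), (255, 100, 50), (200, 60, 30), (120, 40, 20)]  -- Fire - Red/Orange
  else if (["blastoise", "squirtle", "wartortle", "gyarados", "lapras", "articuno"].any
      (fun w => PySem.Str.isIn w mini_lower)) then
    [(240, 240, 255), (100, 150, 255), (60, 100, 200), (30, 60, 150)]  -- Water - Blue
  else if (["venusaur", "bulbasaur", "ivysaur", "oddish", "bellsprout"].any
      (fun w => PySem.Str.isIn w mini_lower)) then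
    [(240, 255, 240), (100, 200, 100), (60, 150, 60), (30, 100, 30)]  -- Grass - Green
  else if (["gengar", "gastly", "haunter", "misdreavus", "murkrow"].any
      (fun w => PySem.Str.isIn w mini_lower)) then
    [(200, 180, 220), (120, 80, 160), (80, 50, 120), (50, 30, 80)]  -- Ghost - Purple
  else if (["machamp", "machoke", "machop", "hitmon"].any
      (fun w => PySem.Str.isIn w mini_lower)) then
    [(255, 220, 180), (200, 140, 100), (150, 100, 70), (100, 70, 50)]  -- Fighting - Brown
  else if (["alakazam", "abra", "kadabra", "mewtwo", "mew"].any
      (fun w => PySem.Str.isIn w mini_lower)) then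
    [(255, 240, 255), (200, 150, 200), (150, 100, 150), (100, 60, 100)]  -- Psychic - Pink
  else
    [(240, 240, 240), (180, 180, 180), (120, 120, 120), (80, 80, 80)]  -- Normal - Gray

-- ===== PORT B =====
-- Source B's PALETTES list: ranks 0..6 are the typed palettes in A's branch order, 7 is the default gray.
def pvPalettes : List (List (Int × Int × Int)) :=
  [ [(255, 255, 200), (255, 220, 0), (200, 150, 0), (100, 80, 0)],        -- 0 Electric
    [(255, 240, 200), (255, 100, 50), (200, 60, 30), (120, 40, 20)],      -- 1 Fire
    [(240, 240, 255), (100, 150, 255), (60, 100, 200), (30, 60, 150)],    -- 2 Water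
    [(240, 255, 240), (100, 200, 100), (60, 150, 60), (30, 100, 30)],     -- 3 Grass
    [(200, 180, 220), (120, 80, 160), (80, 50, 120), (50, 30, 80)],       -- 4 Ghost
    [(255, 220, 180), (200, 140, 100), (150, 100, 70), (100, 70, 50)],    -- 5 Fighting
    [(255, 240, 255), (200, 150, 200), (150, 100, 150), (100, 60, 100)],  -- 6 Psychic
    [(240, 240, 240), (180, 180, 180), (120, 120, 120), (80, 80, 80)] ]   -- 7 Normal (default)

-- Source B's KW_RANK dict literal (keyword -> rule rank), as an association list plus the dict built from it.
def pvKwPairs : List (String × Int) :=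
  [ ("pikachu", 0), ("raichu", 0), ("electabuzz", 0), ("elekid", 0), ("magnezone", 0), ("electrode", 0), ("zapdos", 0),
    ("charizard", 1), ("charmander", 1), ("charmeleon", 1), ("arcanine", 1), ("growlithe", 1), ("moltres", 1),
    ("blastoise", 2), ("squirtle", 2), ("wartortle", 2), ("gyarados", 2), ("lapras", 2), ("articuno", 2),
    ("venusaur", 3), ("bulbasaur", 3), ("ivysaur", 3), ("oddish", 3), ("bellsprout", 3),
    ("gengar", 4), ("gastly", 4), ("haunter", 4), ("misdreavus", 4), ("murkrow", 4),
    ("machamp", 5), ("machoke", 5), ("machop", 5), ("hitmon", 5),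
    ("alakazam", 6), ("abra", 6), ("kadabra", 6), ("mewtwo", 6), ("mew", 6) ]

def pvKwRank : PySem.Dict String Int := PySem.Dict.mk pvKwPairs

def get_type_based_palette_alt (mini_name : String) : List (Int × Int × Int) :=
  let s := PySem.Str.lower mini_name
  let n : Int := PySem.Str.len s
  let best : Int :=
    (PySem.List.pyRange 0 n 1).foldl (fun best i =>
      (PySem.List.pyRange (i + 3) (min (i + 10) n + 1) 1).foldl (fun best j =>
        match pvKwRank.get? (PySem.Str.slice s (some i) (some j)) with
        | some r => if r < best then r else best
        | none => best) best)
      (PySem.List.len pvPalettes - 1)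
  PySem.List.pyGetD pvPalettes best []  -- PALETTES[best]; 0 ≤ best ≤ 7 always, so in range

-- ===== PRECONDITION & SPEC =====
def Spec_get_type_based_palette (mini_name : String) (out : List (Int × Int × Int)) : Prop := out = get_type_based_palette_alt mini_name
instance (mini_name : String) (out : List (Int × Int × Int)) : Decidable (Spec_get_type_based_palette mini_name out) := by unfold Spec_get_type_based_palette; infer_instance

-- ===== CLAIM (what is proved, stated in full; the proofs are below) =====
def Claim_equal_get_type_based_palette : Prop := ∀ (mini_name : String), Dom_get_type_based_palette mini_name → Spec_get_type_based_palette mini_name (get_type_based_palette mini_name)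

-- ===== LEMMAS AND PROOFS =====

-- The multiset of ranks B's double loop can pick up: dict hits of all admissible substrings.
def pvHits (s : String) : List Int :=
  (PySem.List.pyRange 0 (PySem.Str.len s) 1).flatMap (fun i =>
    (PySem.List.pyRange (i + 3) (min (i + 10) (PySem.Str.len s) + 1) 1).filterMap (fun j =>
      pvKwRank.get? (PySem.Str.slice s (some i) (some j))))

-- Every keyword has length 3..10, is looked up to its own rank, and ranks lie in 0..6.
lemma pv_pairs_facts : ∀ p ∈ pvKwPairs, 3 ≤ p.1.toList.length ∧ p.1.toList.length ≤ 10 ∧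
    pvKwRank.get? p.1 = some p.2 ∧ 0 ≤ p.2 ∧ p.2 ≤ 6 := by decide

-- B's conditional-update step over one list is a min-fold over the dict hits.
lemma pv_fold_filterMap (g : Int → Option Int) :
    ∀ (l : List Int) (a : Int),
      l.foldl (fun b j => match g j with | some r => if r < b then r else b | none => b) a
        = (l.filterMap g).foldl min a := by
  intro l
  induction l with
  | nil => intro a; rfl
  | cons x xs ih =>
    intro a
    simp only [List.foldl_cons, List.filterMap_cons]
    cases hgx : g x with
    | none => exact ih a
    | some r =>
      simp only [List.foldl_cons]
      rw [ih]
      congr 1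
      rw [min_def]
      split_ifs <;> omega

-- The nested fold is a min-fold over the flattened hit list.
lemma pv_fold_flat (F : Int → List Int) (g : Int → Int → Option Int) :
    ∀ (l : List Int) (a : Int),
      l.foldl (fun b i => (F i).foldl (fun b' j =>
          match g i j with | some r => if r < b' then r else b' | none => b') b) a
        = (l.flatMap (fun i => (F i).filterMap (g i))).foldl min a := by
  intro l
  induction l with
  | nil => intro a; rfl
  | cons x xs ih =>
    intro a
    simp only [List.foldl_cons, List.flatMap_cons, List.foldl_append]
    rw [pv_fold_filterMap, ih]

lemma pv_foldl_min_le_init : ∀ (l : List Int) (a : Int), l.foldl min a ≤ a := by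
  intro l
  induction l with
  | nil => intro a; exact le_refl a
  | cons x xs ih => intro a; exact le_trans (ih (min a x)) (min_le_left a x)

lemma pv_foldl_min_le_mem : ∀ (l : List Int) (a x : Int), x ∈ l → l.foldl min a ≤ x := by
  intro l
  induction l with
  | nil => intro a x hx; cases hx
  | cons y ys ih =>
    intro a x hx
    rcases List.mem_cons.mp hx with h | h
    · subst h; exact le_trans (pv_foldl_min_le_init ys (min a x)) (min_le_right a x)
    · exact ih (min a y) x h

lemma pv_foldl_min_mem_or : ∀ (l : List Int) (a : Int), l.foldl min a = a ∨ l.foldl min a ∈ l := by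
  intro l
  induction l with
  | nil => intro a; exact Or.inl rfl
  | cons y ys ih =>
    intro a
    rcases ih (min a y) with h | h
    · rw [List.foldl_cons, h, min_def]
      split_ifs with hc
      · exact Or.inl rfl
      · exact Or.inr (List.mem_cons_self)
    · exact Or.inr (List.mem_cons_of_mem y h)

-- B evaluates to the palette at the minimum of the hit list (default index 7).
lemma pv_alt_eq (mini : String) :
    get_type_based_palette_alt mini
      = PySem.List.pyGetD pvPalettes ((pvHits (PySem.Str.lower mini)).foldl min 7) [] := by
  have h7 : PySem.List.len pvPalettes - 1 = (7 : Int) := by decide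
  simp only [get_type_based_palette_alt]
  rw [h7, pv_fold_flat]
  rfl

-- A rank is hit by B's substring enumeration iff some keyword of that rank occurs in s.
lemma pv_mem_hits_iff (s : String) (r : Int) :
    r ∈ pvHits s ↔ ∃ w : String, (w, r) ∈ pvKwPairs ∧ PySem.Str.isIn w s = true := by
  constructor
  · intro h
    simp only [pvHits, List.mem_flatMap, List.mem_filterMap, PySem.List.mem_pyRange_one] at h
    obtain ⟨i, ⟨hi0, _⟩, j, ⟨hj1, _⟩, hget⟩ := h
    refine ⟨PySem.Str.slice s (some i) (some j), PySem.Dict.mem_items_of_get?_eq_some _ hget, ?_⟩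
    rw [PySem.Str.isIn_iff_infix]
    have hts : (PySem.Str.slice s (some i) (some j)).toList
        = PySem.List.slice s.toList (some i) (some j) := by simp [pysem]
    rw [hts, PySem.List.slice_toNat s.toList hi0 (by omega)]
    exact ((s.toList.drop i.toNat).take_prefix _).isInfix.trans (s.toList.drop_suffix i.toNat).isInfix
  · rintro ⟨w, hwmem, hwin⟩
    obtain ⟨h3, h10, hget, -, -⟩ := pv_pairs_facts (w, r) hwmem
    have h3' : 3 ≤ w.toList.length := h3
    have h10' : w.toList.length ≤ 10 := h10
    have hget' : pvKwRank.get? w = some r := hget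
    obtain ⟨u, v, huv⟩ := (PySem.Str.isIn_iff_infix w s).mp hwin
    have hlen : u.length + w.toList.length + v.length = s.toList.length := by
      have h := congrArg List.length huv
      simp only [List.length_append] at h
      omega
    have hn : PySem.Str.len s = (s.toList.length : Int) := by simp [pysem]
    have hslice : PySem.Str.slice s (some (u.length : Int))
        (some ((u.length : Int) + (w.toList.length : Int))) = w := by
      apply String.toList_inj.mp
      have hts : (PySem.Str.slice s (some (u.length : Int))
          (some ((u.length : Int) + (w.toList.length : Int)))).toList
          = PySem.List.slice s.toList (some (u.length : Int))
            (some ((u.length : Int) + (w.toList.length : Int))) := by simp [pysem]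
      rw [hts, ← huv]
      have hsl := PySem.List.slice_natCast_add (u ++ w.toList ++ v) u.length w.toList.length
      push_cast at hsl ⊢
      rw [hsl]
      simp [List.append_assoc]
    simp only [pvHits, List.mem_flatMap, List.mem_filterMap, PySem.List.mem_pyRange_one]
    refine ⟨(u.length : Int), ⟨by positivity, ?_⟩,
            (u.length : Int) + (w.toList.length : Int), ⟨by omega, ?_⟩, ?_⟩
    · rw [hn]; omega
    · rw [hn, Int.lt_add_one_iff, le_min_iff]
      omega
    · rw [hslice]; exact hget'

lemma pv_hits_bounds (s : String) (r : Int) (h : r ∈ pvHits s) : 0 ≤ r ∧ r ≤ 6 := by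
  obtain ⟨w, hw, -⟩ := (pv_mem_hits_iff s r).mp h
  obtain ⟨-, -, -, h0, h6⟩ := pv_pairs_facts (w, r) hw
  exact ⟨h0, h6⟩

lemma pv_hit0 (s : String) : ((0 : Int) ∈ pvHits s) ↔
    (["pikachu", "raichu", "electabuzz", "elekid", "magnezone", "electrode", "zapdos"].any
      (fun w => PySem.Str.isIn w s)) = true := by
  rw [pv_mem_hits_iff]; simp [pvKwPairs]

lemma pv_hit1 (s : String) : ((1 : Int) ∈ pvHits s) ↔
    (["charizard", "charmander", "charmeleon", "arcanine", "growlithe", "moltres"].any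
      (fun w => PySem.Str.isIn w s)) = true := by
  rw [pv_mem_hits_iff]; simp [pvKwPairs]

lemma pv_hit2 (s : String) : ((2 : Int) ∈ pvHits s) ↔
    (["blastoise", "squirtle", "wartortle", "gyarados", "lapras", "articuno"].any
      (fun w => PySem.Str.isIn w s)) = true := by
  rw [pv_mem_hits_iff]; simp [pvKwPairs]

lemma pv_hit3 (s : String) : ((3 : Int) ∈ pvHits s) ↔
    (["venusaur", "bulbasaur", "ivysaur", "oddish", "bellsprout"].any
      (fun w => PySem.Str.isIn w s)) = true := by
  rw [pv_mem_hits_iff]; simp [pvKwPairs]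

lemma pv_hit4 (s : String) : ((4 : Int) ∈ pvHits s) ↔
    (["gengar", "gastly", "haunter", "misdreavus", "murkrow"].any
      (fun w => PySem.Str.isIn w s)) = true := by
  rw [pv_mem_hits_iff]; simp [pvKwPairs]

lemma pv_hit5 (s : String) : ((5 : Int) ∈ pvHits s) ↔
    (["machamp", "machoke", "machop", "hitmon"].any
      (fun w => PySem.Str.isIn w s)) = true := by
  rw [pv_mem_hits_iff]; simp [pvKwPairs]

lemma pv_hit6 (s : String) : ((6 : Int) ∈ pvHits s) ↔
    (["alakazam", "abra", "kadabra", "mewtwo", "mew"].any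
      (fun w => PySem.Str.isIn w s)) = true := by
  rw [pv_mem_hits_iff]; simp [pvKwPairs]

lemma pv_main (mini : String) :
    get_type_based_palette mini = get_type_based_palette_alt mini := by
  rw [pv_alt_eq]
  simp only [get_type_based_palette]
  set s := PySem.Str.lower mini with hs
  set m := (pvHits s).foldl min 7 with hm
  have hmor := pv_foldl_min_mem_or (pvHits s) 7
  split_ifs with h0 h1 h2 h3 h4 h5 h6
  · -- Electric
    have hle : m ≤ 0 := pv_foldl_min_le_mem _ _ _ ((pv_hit0 s).mpr h0)
    have hmhits : m ∈ pvHits s := by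
      rcases hmor with h | h
      · exfalso; omega
      · exact h
    have hb := pv_hits_bounds s m hmhits
    have : m = 0 := by omega
    rw [this]; decide
  · -- Fire
    have hle : m ≤ 1 := pv_foldl_min_le_mem _ _ _ ((pv_hit1 s).mpr h1)
    have hmhits : m ∈ pvHits s := by
      rcases hmor with h | h
      · exfalso; omega
      · exact h
    have hb := pv_hits_bounds s m hmhits
    have hne0 : m ≠ 0 := fun heq => h0 ((pv_hit0 s).mp (heq ▸ hmhits))
    have : m = 1 := by omega
    rw [this]; decide
  · -- Water
    have hle : m ≤ 2 := pv_foldl_min_le_mem _ _ _ ((pv_hit2 s).mpr h2)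
    have hmhits : m ∈ pvHits s := by
      rcases hmor with h | h
      · exfalso; omega
      · exact h
    have hb := pv_hits_bounds s m hmhits
    have hne0 : m ≠ 0 := fun heq => h0 ((pv_hit0 s).mp (heq ▸ hmhits))
    have hne1 : m ≠ 1 := fun heq => h1 ((pv_hit1 s).mp (heq ▸ hmhits))
    have : m = 2 := by omega
    rw [this]; decide
  · -- Grass
    have hle : m ≤ 3 := pv_foldl_min_le_mem _ _ _ ((pv_hit3 s).mpr h3)
    have hmhits : m ∈ pvHits s := by
      rcases hmor with h | h
      · exfalso; omega
      · exact h
    have hb := pv_hits_bounds s m hmhits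
    have hne0 : m ≠ 0 := fun heq => h0 ((pv_hit0 s).mp (heq ▸ hmhits))
    have hne1 : m ≠ 1 := fun heq => h1 ((pv_hit1 s).mp (heq ▸ hmhits))
    have hne2 : m ≠ 2 := fun heq => h2 ((pv_hit2 s).mp (heq ▸ hmhits))
    have : m = 3 := by omega
    rw [this]; decide
  · -- Ghost
    have hle : m ≤ 4 := pv_foldl_min_le_mem _ _ _ ((pv_hit4 s).mpr h4)
    have hmhits : m ∈ pvHits s := by
      rcases hmor with h | h
      · exfalso; omega
      · exact h
    have hb := pv_hits_bounds s m hmhits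
    have hne0 : m ≠ 0 := fun heq => h0 ((pv_hit0 s).mp (heq ▸ hmhits))
    have hne1 : m ≠ 1 := fun heq => h1 ((pv_hit1 s).mp (heq ▸ hmhits))
    have hne2 : m ≠ 2 := fun heq => h2 ((pv_hit2 s).mp (heq ▸ hmhits))
    have hne3 : m ≠ 3 := fun heq => h3 ((pv_hit3 s).mp (heq ▸ hmhits))
    have : m = 4 := by omega
    rw [this]; decide
  · -- Fighting
    have hle : m ≤ 5 := pv_foldl_min_le_mem _ _ _ ((pv_hit5 s).mpr h5)
    have hmhits : m ∈ pvHits s := by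
      rcases hmor with h | h
      · exfalso; omega
      · exact h
    have hb := pv_hits_bounds s m hmhits
    have hne0 : m ≠ 0 := fun heq => h0 ((pv_hit0 s).mp (heq ▸ hmhits))
    have hne1 : m ≠ 1 := fun heq => h1 ((pv_hit1 s).mp (heq ▸ hmhits))
    have hne2 : m ≠ 2 := fun heq => h2 ((pv_hit2 s).mp (heq ▸ hmhits))
    have hne3 : m ≠ 3 := fun heq => h3 ((pv_hit3 s).mp (heq ▸ hmhits))
    have hne4 : m ≠ 4 := fun heq => h4 ((pv_hit4 s).mp (heq ▸ hmhits))
    have : m = 5 := by omega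
    rw [this]; decide
  · -- Psychic
    have hle : m ≤ 6 := pv_foldl_min_le_mem _ _ _ ((pv_hit6 s).mpr h6)
    have hmhits : m ∈ pvHits s := by
      rcases hmor with h | h
      · exfalso; omega
      · exact h
    have hb := pv_hits_bounds s m hmhits
    have hne0 : m ≠ 0 := fun heq => h0 ((pv_hit0 s).mp (heq ▸ hmhits))
    have hne1 : m ≠ 1 := fun heq => h1 ((pv_hit1 s).mp (heq ▸ hmhits))
    have hne2 : m ≠ 2 := fun heq => h2 ((pv_hit2 s).mp (heq ▸ hmhits))
    have hne3 : m ≠ 3 := fun heq => h3 ((pv_hit3 s).mp (heq ▸ hmhits))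
    have hne4 : m ≠ 4 := fun heq => h4 ((pv_hit4 s).mp (heq ▸ hmhits))
    have hne5 : m ≠ 5 := fun heq => h5 ((pv_hit5 s).mp (heq ▸ hmhits))
    have : m = 6 := by omega
    rw [this]; decide
  · -- Normal (default): nothing was hit, so m = 7
    have : m = 7 := by
      rcases hmor with h | hmhits
      · exact h
      · exfalso
        have hb := pv_hits_bounds s m hmhits
        have hne0 : m ≠ 0 := fun heq => h0 ((pv_hit0 s).mp (heq ▸ hmhits))
        have hne1 : m ≠ 1 := fun heq => h1 ((pv_hit1 s).mp (heq ▸ hmhits))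
        have hne2 : m ≠ 2 := fun heq => h2 ((pv_hit2 s).mp (heq ▸ hmhits))
        have hne3 : m ≠ 3 := fun heq => h3 ((pv_hit3 s).mp (heq ▸ hmhits))
        have hne4 : m ≠ 4 := fun heq => h4 ((pv_hit4 s).mp (heq ▸ hmhits))
        have hne5 : m ≠ 5 := fun heq => h5 ((pv_hit5 s).mp (heq ▸ hmhits))
        have hne6 : m ≠ 6 := fun heq => h6 ((pv_hit6 s).mp (heq ▸ hmhits))
        omega
    rw [this]; decide

-- ===== VERDICT (by name: the statement is the Claim_ definition above) =====
theorem get_type_based_palette_spec : Claim_equal_get_type_based_palette := by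
  intro mini _
  show get_type_based_palette mini = get_type_based_palette_alt mini
  exact pv_main mini
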